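-- pv_equiv track=rewrite | github.com/davweb/adventofcode2017 | advent/year2019/day4.py | has_pair_of_digits
-- ===== SOURCE A (Python) =====
-- def digits(n):
--     """
--     >>> digits(0)
--     Traceback (most recent call last):
--         ...
--     ValueError: '0' is not a positive integer
--     >>> digits(1)
--     [1]
--     >>> digits(12)
--     [1, 2]
--     >>> digits(333)
--     [3, 3, 3]
--     >>> digits(123456)
--     [1, 2, 3, 4, 5, 6]
--     """
--
--     if n < 1:
--         raise ValueError("'{}' is not a positive integer".format(n))
--
--     result = []
--
--     while(n > 0):
--         digit = n % 10
--         n //= 10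
--         result.append(digit)
--
--     result.reverse()
--     return result
--
-- def has_pair_of_digits(n):
--     """
--     >>> has_pair_of_digits(112233)
--     True
--     >>> has_pair_of_digits(123444)
--     False
--     >>> has_pair_of_digits(111122)
--     True
--     >>> has_pair_of_digits(221111)
--     True
--     >>> has_pair_of_digits(112211)
--     True
--     """
--
--     last = None
--     count = 0
--
--     for digit in digits(n):
--         if last == digit:
--             count += 1
--         elif count == 2:
--             return True
--         else:
--             count = 1
--
--         last = digit
--
--     return count == 2
-- ===== SOURCE B (Python) =====
-- def digits(n):
--     if n < 1:
--         raise ValueError("'{}' is not a positive integer".format(n))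
--
--     result = []
--
--     while(n > 0):
--         digit = n % 10
--         n //= 10
--         result.append(digit)
--
--     result.reverse()
--     return result
--
-- def has_pair_of_digits(n):
--     d = digits(n)
--     L = len(d)
--     return any(d[i] == d[i + 1]
--                and (i == 0 or d[i - 1] != d[i])
--                and (i + 2 == L or d[i + 2] != d[i])
--                for i in range(L - 1))
-- ===== Notes on version B (the rewrite author's own statement) =====
-- stated objective: alternative
-- what changed: Replaces A's stateful run-counter state machine (last/count threaded across the loop with an early return at run transitions) by a stateless positional characterization: some index i has d[i] == d[i+1] with a different digit (or a list end) on each side of the pair.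
import Mathlib
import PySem

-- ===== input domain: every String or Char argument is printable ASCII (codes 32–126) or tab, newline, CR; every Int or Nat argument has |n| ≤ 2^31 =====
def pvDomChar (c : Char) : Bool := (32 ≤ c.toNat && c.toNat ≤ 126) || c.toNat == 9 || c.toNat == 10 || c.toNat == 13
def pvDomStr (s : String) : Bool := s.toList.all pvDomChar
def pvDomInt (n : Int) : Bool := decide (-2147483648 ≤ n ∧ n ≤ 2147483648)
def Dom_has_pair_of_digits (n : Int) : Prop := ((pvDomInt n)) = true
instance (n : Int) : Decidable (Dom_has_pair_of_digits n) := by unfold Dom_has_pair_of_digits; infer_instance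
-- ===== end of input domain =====

-- B replaces A's run-counter state machine by a stateless positional test: some adjacent
-- equal pair of digits flanked by a different digit (or a list end) on both sides.

-- ===== PORT A =====
-- shared helper `digits` (identical in A's and B's Python); the n < 1 branch mirrors the raise (excluded by Pre_)
def digitsLoop (n : Int) (acc : List Int) : List Int :=
  if _h : n > 0 then
    digitsLoop (PySem.Int.floordiv n 10) (acc ++ [PySem.Int.mod n 10])
  else acc
termination_by n.toNat
decreasing_by
  rw [PySem.Int.floordiv_eq_ediv_of_pos (by omega)]
  omega

def digits (n : Int) : List Int :=
  if n < 1 then []  -- the Python raises ValueError on this branch; outside Pre_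
  else (digitsLoop n []).reverse

-- A's loop: state (last, count), early return on `count == 2` at a transition
def loopA (last : Option Int) (count : Int) : List Int → Bool
  | [] => count == 2
  | d :: ds =>
    if last == some d then loopA (some d) (count + 1) ds
    else if count == 2 then true
    else loopA (some d) 1 ds

def has_pair_of_digits (n : Int) : Bool := loopA none 0 (digits n)

-- ===== PORT B =====
-- any over range(L-1); Python's d[i], d[i+1], d[i-1], d[i+2] are always in range where
-- evaluated (short-circuit guards), so getD is exact here; range(L-1) = List.range (L-1) since L ≥ 0
def has_pair_of_digits_alt (n : Int) : Bool :=
  let d := digits n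
  let L := d.length
  (List.range (L - 1)).any (fun i =>
    d.getD i 0 == d.getD (i + 1) 0 &&
    (i == 0 || d.getD (i - 1) 0 != d.getD i 0) &&
    (i + 2 == L || d.getD (i + 2) 0 != d.getD i 0))

-- ===== PRECONDITION & SPEC =====
-- Pre_ excludes exactly the non-positive inputs, on which both Pythons raise ValueError.
def Pre_has_pair_of_digits (n : Int) : Prop := 1 ≤ n
instance (n : Int) : Decidable (Pre_has_pair_of_digits n) := by unfold Pre_has_pair_of_digits; infer_instance
def pvWitness_has_pair_of_digits : Int := 112233

def Spec_has_pair_of_digits (n : Int) (out : Bool) : Prop := out = has_pair_of_digits_alt n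
instance (n : Int) (out : Bool) : Decidable (Spec_has_pair_of_digits n out) := by unfold Spec_has_pair_of_digits; infer_instance

-- ===== CLAIM (what is proved, stated in full; the proofs are below) =====
def Claim_equal_has_pair_of_digits : Prop := ∀ (n : Int), Dom_has_pair_of_digits n → Pre_has_pair_of_digits n → Spec_has_pair_of_digits n (has_pair_of_digits n)

-- ===== LEMMAS AND PROOFS =====

-- maximal runs of equal adjacent elements: the common yardstick both programs are reduced to
def pyGroup : List Int → List (List Int)
  | [] => []
  | d :: ds => (d :: ds.takeWhile (· == d)) :: pyGroup (ds.dropWhile (· == d))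
termination_by l => l.length
decreasing_by
  simpa using Nat.lt_succ_of_le (List.length_dropWhile_le _ _)

theorem beq_one_shift (L : Nat) : ((1 + (L : Int)) == 2) = ((L + 1 : Nat) == 2) := by
  rw [Bool.eq_iff_iff]; simp only [beq_iff_eq]; omega

-- A's loop, entered with a current run of length c ending in digit d, equals:
-- "the current run (extended by the adjacent copies of d in ds) has total length 2,
--  or some later maximal run has length 2".
theorem loopA_eq (ds : List Int) : ∀ (d c : Int),
    loopA (some d) c ds
      = ((c + (ds.takeWhile (· == d)).length == 2)
         || (pyGroup (ds.dropWhile (· == d))).any (fun g => g.length == 2)) := by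
  induction ds with
  | nil => intro d c; simp [loopA, pyGroup]
  | cons e ds ih =>
    intro d c
    by_cases he : e = d
    · subst he
      have hstep : loopA (some e) c (e :: ds) = loopA (some e) (c + 1) ds := by
        simp [loopA]
      rw [hstep, ih e (c + 1)]
      rw [List.takeWhile_cons_of_pos (by simp), List.dropWhile_cons_of_pos (by simp)]
      simp only [List.length_cons]
      rw [show ((((ds.takeWhile (· == e)).length + 1 : Nat) : Int))
            = ((ds.takeWhile (· == e)).length : Int) + 1 by push_cast; ring]
      rw [show c + (((ds.takeWhile (· == e)).length : Int) + 1)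
            = c + 1 + ((ds.takeWhile (· == e)).length : Int) by ring]
    · have hstep : loopA (some d) c (e :: ds)
          = (if c == 2 then true else loopA (some e) 1 ds) := by
        simp only [loopA]
        rw [if_neg (by simp; omega)]
      rw [hstep, List.takeWhile_cons_of_neg (by simp [he]),
        List.dropWhile_cons_of_neg (by simp [he])]
      by_cases hc : c = 2
      · subst hc
        simp [pyGroup]
      · rw [if_neg (by simpa using hc), ih e 1]
        simp only [pyGroup, List.any_cons, List.length_cons, List.length_nil]
        rw [show ((c + ((0:Nat):Int)) == 2) = false by simp [hc]]
        rw [beq_one_shift]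
        simp

theorem loopA_start (l : List Int) :
    loopA none 0 l = (pyGroup l).any (fun g => g.length == 2) := by
  cases l with
  | nil => simp [loopA, pyGroup]
  | cons d ds =>
    have hstep : loopA none 0 (d :: ds) = loopA (some d) 1 ds := by simp [loopA]
    rw [hstep, loopA_eq ds d 1]
    simp only [pyGroup, List.any_cons, List.length_cons]
    rw [beq_one_shift]

-- B-side yardstick: structural window recursion carrying the previously consumed element
def nextOK (a : Int) : List Int → Bool
  | [] => true
  | c :: _ => c != a

def prevOK : Option Int → Int → Bool
  | none, _ => true
  | some q, a => q != a

def posRec : Option Int → List Int → Bool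
  | _, [] => false
  | _, [_] => false
  | p, a :: b :: t =>
    ((a == b) && prevOK p a && nextOK a t) || posRec (some a) (b :: t)

theorem posRec_some (l : List Int) : ∀ (d : Int),
    posRec (some d) l = (pyGroup (l.dropWhile (· == d))).any (fun g => g.length == 2) := by
  induction l with
  | nil => intro d; simp [posRec, pyGroup]
  | cons a t ih =>
    intro d
    by_cases ha : a = d
    · subst ha
      rw [List.dropWhile_cons_of_pos (by simp)]
      cases t with
      | nil => simp [posRec, pyGroup]
      | cons b t' =>
        have hstep : posRec (some a) (a :: b :: t') = posRec (some a) (b :: t') := by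
          simp [posRec, prevOK]
        rw [hstep, ih a]
    · rw [List.dropWhile_cons_of_neg (by simp [ha])]
      cases t with
      | nil => simp [posRec, pyGroup]
      | cons b t' =>
        simp only [posRec, prevOK]
        rw [ih a]
        simp only [pyGroup, List.any_cons, List.length_cons]
        have hd : (d != a) = true := by simp [Ne.symm ha]
        by_cases hb : b = a
        · subst hb
          rw [List.takeWhile_cons_of_pos (by simp), List.dropWhile_cons_of_pos (by simp)]
          simp only [List.length_cons]
          cases t' with
          | nil => simp [pyGroup, nextOK, hd]
          | cons c t'' =>
            by_cases hc : c = b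
            · subst hc
              rw [List.takeWhile_cons_of_pos (by simp), List.dropWhile_cons_of_pos (by simp)]
              simp [nextOK, hd]
            · rw [List.takeWhile_cons_of_neg (by simp [hc]), List.dropWhile_cons_of_neg (by simp [hc])]
              simp [nextOK, hd, hc]
        · rw [List.takeWhile_cons_of_neg (by simp [hb]), List.dropWhile_cons_of_neg (by simp [hb])]
          have hab : (a == b) = false := by rw [beq_eq_false_iff_ne]; exact fun h => hb h.symm
          simp [hab]

theorem posRec_none (l : List Int) :
    posRec none l = (pyGroup l).any (fun g => g.length == 2) := by
  cases l with
  | nil => simp [posRec, pyGroup]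
  | cons a t =>
    cases t with
    | nil => simp [posRec, pyGroup]
    | cons b t' =>
      simp only [posRec, prevOK]
      rw [posRec_some (b :: t') a]
      simp only [pyGroup, List.any_cons, List.length_cons]
      by_cases hb : b = a
      · subst hb
        rw [List.takeWhile_cons_of_pos (by simp), List.dropWhile_cons_of_pos (by simp)]
        simp only [List.length_cons]
        cases t' with
        | nil => simp [pyGroup, nextOK]
        | cons c t'' =>
          by_cases hc : c = b
          · subst hc
            rw [List.takeWhile_cons_of_pos (by simp), List.dropWhile_cons_of_pos (by simp)]
            simp [nextOK]
          · rw [List.takeWhile_cons_of_neg (by simp [hc]), List.dropWhile_cons_of_neg (by simp [hc])]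
            simp [nextOK, hc]
      · rw [List.takeWhile_cons_of_neg (by simp [hb]), List.dropWhile_cons_of_neg (by simp [hb])]
        have hab : (a == b) = false := by rw [beq_eq_false_iff_ne]; exact fun h => hb h.symm
        simp [hab]

-- the window condition of B's port, left context supplied explicitly
def winAux (p : Int) (l : List Int) : Bool :=
  (List.range (l.length - 1)).any (fun i =>
    l.getD i 0 == l.getD (i + 1) 0 &&
    ((if i = 0 then p else l.getD (i - 1) 0) != l.getD i 0) &&
    (i + 2 == l.length || l.getD (i + 2) 0 != l.getD i 0))

theorem any_range_succ_shift (n : Nat) (f : Nat → Bool) :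
    (List.range (n + 1)).any f = (f 0 || (List.range n).any (fun i => f (i + 1))) := by
  rw [List.range_succ_eq_map]
  simp [List.any_map, Function.comp_def]

theorem winAux_eq_posRec (l : List Int) : ∀ (p : Int),
    winAux p l = posRec (some p) l := by
  induction l with
  | nil => intro p; simp [winAux, posRec]
  | cons a t ih =>
    intro p
    cases t with
    | nil => simp [winAux, posRec]
    | cons b t' =>
      rw [winAux]
      simp only [List.length_cons, Nat.add_sub_cancel]
      rw [any_range_succ_shift]
      simp only [posRec, prevOK]
      refine congrArg₂ (· || ·) ?_ ?_
      · -- the i = 0 window is exactly the head clause of posRec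
        cases t' with
        | nil => simp [nextOK]
        | cons c t'' =>
          simp only [List.getD_cons_zero, List.getD_cons_succ, List.length_cons, nextOK]
          have h0 : ((0:Nat) + 2 == t''.length + 1 + 1 + 1) = false := by
            simp only [beq_eq_false_iff_ne]; omega
          simp [h0]
      · -- the shifted windows are winAux with left context a
        rw [← ih a, winAux]
        simp only [List.length_cons, Nat.add_sub_cancel]
        refine List.any_congr rfl ?_
        intro i
        cases i with
        | zero => simp
        | succ j =>
          have hbeq : ((j + 1 + 1 + 2 : Nat) == t'.length + 1 + 1)
              = ((j + 1 + 2 : Nat) == t'.length + 1) := by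
            rw [Bool.eq_iff_iff]; simp only [beq_iff_eq]; omega
          simp only [List.getD_cons_succ, Nat.add_sub_cancel,
            if_neg (Nat.succ_ne_zero j), if_neg (Nat.succ_ne_zero (j + 1)), hbeq]

-- B's port unfolded onto the structural window recursion
theorem alt_eq_posRec (n : Int) :
    has_pair_of_digits_alt n = posRec none (digits n) := by
  unfold has_pair_of_digits_alt
  generalize digits n = l
  cases l with
  | nil => simp [posRec]
  | cons a t =>
    cases t with
    | nil => simp [posRec]
    | cons b t' =>
      simp only [List.length_cons, Nat.add_sub_cancel]
      rw [any_range_succ_shift]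
      simp only [posRec, prevOK]
      refine congrArg₂ (· || ·) ?_ ?_
      · cases t' with
        | nil => simp [nextOK]
        | cons c t'' =>
          simp only [List.getD_cons_zero, List.getD_cons_succ, List.length_cons, nextOK]
          have h0 : ((0:Nat) + 2 == t''.length + 1 + 1 + 1) = false := by
            simp only [beq_eq_false_iff_ne]; omega
          simp [h0]
      · rw [← winAux_eq_posRec (b :: t') a, winAux]
        simp only [List.length_cons, Nat.add_sub_cancel]
        refine List.any_congr rfl ?_
        intro i
        cases i with
        | zero => simp
        | succ j =>
          have hbeq : ((j + 1 + 1 + 2 : Nat) == t'.length + 1 + 1)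
              = ((j + 1 + 2 : Nat) == t'.length + 1) := by
            rw [Bool.eq_iff_iff]; simp only [beq_iff_eq]; omega
          simp only [List.getD_cons_succ, Nat.add_sub_cancel, hbeq]
          simp

-- ===== VERDICT (by name: the statement is the Claim_ definition above) =====
theorem has_pair_of_digits_spec : Claim_equal_has_pair_of_digits := by
  intro n _ _
  unfold Spec_has_pair_of_digits has_pair_of_digits
  rw [alt_eq_posRec, posRec_none, loopA_start]
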